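-- pv_equiv track=rewrite | github.com/Jerenyaoyelu/COMP6714-project-part1 | project_part1.py | getListComplement
-- ===== SOURCE A (Python) =====
-- def getListComplement(query_token_list,entity_token_lsit):
--     lc = []
--     qtl_sorted = sorted(query_token_list)
--     etl_sorted = sorted(entity_token_lsit)
--     while etl_sorted:
--         if qtl_sorted[0] < etl_sorted[0]:
--             lc.append(qtl_sorted[0])
--             qtl_sorted.pop(0)
--         else:
--             qtl_sorted.pop(0)
--             etl_sorted.pop(0)
--     return lc + qtl_sorted
-- ===== SOURCE B (Python) =====
-- def getListComplement(query_token_list, entity_token_lsit):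
--     # two index pointers over the sorted lists instead of repeated pop(0)
--     qs = sorted(query_token_list)
--     out = []
--     i = 0
--     for e in sorted(entity_token_lsit):
--         while qs[i] < e:
--             out.append(qs[i])
--             i += 1
--         i += 1
--     return out + qs[i:]
-- ===== Notes on version B (the rewrite author's own statement) =====
-- stated objective: faster
-- what changed: replaces A's while-loop that pops element 0 of both sorted lists (each pop(0) is O(n)) by a for-loop over the sorted entity list with a single advancing index pointer into the sorted query list, so nothing is ever shifted
import Mathlib
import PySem

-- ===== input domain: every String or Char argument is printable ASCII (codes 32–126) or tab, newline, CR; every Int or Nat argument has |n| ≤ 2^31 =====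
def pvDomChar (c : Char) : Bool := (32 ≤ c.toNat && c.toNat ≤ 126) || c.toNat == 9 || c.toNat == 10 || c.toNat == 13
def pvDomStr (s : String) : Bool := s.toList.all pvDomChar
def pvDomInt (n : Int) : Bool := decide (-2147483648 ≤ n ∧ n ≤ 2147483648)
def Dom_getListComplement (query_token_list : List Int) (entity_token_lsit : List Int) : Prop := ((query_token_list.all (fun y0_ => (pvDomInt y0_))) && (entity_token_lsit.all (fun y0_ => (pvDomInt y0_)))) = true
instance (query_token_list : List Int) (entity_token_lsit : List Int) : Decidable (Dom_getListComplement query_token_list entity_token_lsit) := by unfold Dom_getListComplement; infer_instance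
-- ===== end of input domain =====

-- B replaces A's pop(0)-driven while-loop by a for-loop over the sorted entities with an
-- advancing index pointer into the sorted query list (objective: faster, no list shifting).


-- ===== PORT A =====
-- A's while-loop: lc accumulator, qtl_sorted and etl_sorted consumed from the front.
-- The ([], e::etl) case is where Python A raises IndexError (qtl_sorted[0]); excluded by Pre_.
def pvALoop : List Int → List Int → List Int → List Int
  | lc, qtl, [] => lc ++ qtl
  | lc, [], _ :: _ => lc
  | lc, q :: qtl, e :: etl =>
      if q < e then pvALoop (lc ++ [q]) qtl (e :: etl)
      else pvALoop lc qtl etl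
termination_by _ qtl _ => qtl.length

def getListComplement (query_token_list : List Int) (entity_token_lsit : List Int) : List Int :=
  pvALoop [] (PySem.List.sorted query_token_list (fun x => x))
             (PySem.List.sorted entity_token_lsit (fun x => x))

-- ===== PORT B =====
-- inner `while qs[i] < e`: appends qs[i] and advances i.  qs[i]? = none is where Python B
-- raises IndexError; excluded by Pre_.
def pvBWhile (qs : List Int) (e : Int) : List Int → Nat → List Int × Nat
  | out, i =>
      match h : qs[i]? with
      | some v => if v < e then pvBWhile qs e (out ++ [v]) (i + 1) else (out, i)
      | none => (out, i)
termination_by out i => qs.length - i -- (out unused in the measure)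
decreasing_by
  have : i < qs.length := by
    by_contra hge
    simp [List.getElem?_eq_none (by omega : qs.length ≤ i)] at h
  omega

def getListComplement_alt (query_token_list : List Int) (entity_token_lsit : List Int) : List Int :=
  let qs := PySem.List.sorted query_token_list (fun x => x)
  let st := (PySem.List.sorted entity_token_lsit (fun x => x)).foldl
      (fun (st : List Int × Nat) e =>
        let st' := pvBWhile qs e st.1 st.2
        (st'.1, st'.2 + 1)) ([], 0)
  st.1 ++ qs.drop st.2

-- ===== PRECONDITION & SPEC =====
-- Pre_ excludes exactly the inputs on which Python A raises IndexError (the sorted query list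
-- is exhausted while entity tokens remain); Python B raises IndexError on the same inputs.
def Pre_getListComplement (query_token_list : List Int) (entity_token_lsit : List Int) : Prop :=
  ∀ k : Nat, k < entity_token_lsit.length →
    query_token_list.countP
        (fun x => x < (PySem.List.sorted entity_token_lsit (fun x => x))[k]!)
      + (entity_token_lsit.length - 1 - k) < query_token_list.length
instance (query_token_list : List Int) (entity_token_lsit : List Int) : Decidable (Pre_getListComplement query_token_list entity_token_lsit) := by unfold Pre_getListComplement; infer_instance

def pvWitness_getListComplement : List Int × List Int := ([1, 2, 3], [2])

def Spec_getListComplement (query_token_list : List Int) (entity_token_lsit : List Int) (out : List Int) : Prop := out = getListComplement_alt query_token_list entity_token_lsit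
instance (query_token_list : List Int) (entity_token_lsit : List Int) (out : List Int) : Decidable (Spec_getListComplement query_token_list entity_token_lsit out) := by unfold Spec_getListComplement; infer_instance

-- ===== CLAIM (what is proved, stated in full; the proofs are below) =====
def Claim_equal_getListComplement : Prop := ∀ (query_token_list : List Int) (entity_token_lsit : List Int), Dom_getListComplement query_token_list entity_token_lsit → Pre_getListComplement query_token_list entity_token_lsit → Spec_getListComplement query_token_list entity_token_lsit (getListComplement query_token_list entity_token_lsit)

-- ===== LEMMAS AND PROOFS =====

-- B's run from an arbitrary state (out, i) over entity list es (the foldl of the port with a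
-- generalized initial state).
def pvBRun (qs : List Int) (es : List Int) (out : List Int) (i : Nat) : List Int :=
  let st := es.foldl
      (fun (st : List Int × Nat) e =>
        let st' := pvBWhile qs e st.1 st.2
        (st'.1, st'.2 + 1)) (out, i)
  st.1 ++ qs.drop st.2

theorem pvBWhile_none {qs : List Int} {e : Int} {out : List Int} {i : Nat}
    (h : qs[i]? = none) : pvBWhile qs e out i = (out, i) := by
  rw [pvBWhile]; split <;> simp_all

theorem pvBWhile_lt {qs : List Int} {e q : Int} {out : List Int} {i : Nat}
    (h : qs[i]? = some q) (hlt : q < e) :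
    pvBWhile qs e out i = pvBWhile qs e (out ++ [q]) (i + 1) := by
  conv_lhs => rw [pvBWhile]
  split <;> simp_all

theorem pvBWhile_ge {qs : List Int} {e q : Int} {out : List Int} {i : Nat}
    (h : qs[i]? = some q) (hge : ¬ q < e) :
    pvBWhile qs e out i = (out, i) := by
  rw [pvBWhile]; split <;> simp_all

theorem pvBRun_past (qs : List Int) (es : List Int) (out : List Int) (i : Nat)
    (h : qs.length ≤ i) : pvBRun qs es out i = out := by
  induction es generalizing i with
  | nil => simp [pvBRun, List.drop_eq_nil_of_le h]
  | cons e es ih =>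
      have hn : qs[i]? = none := List.getElem?_eq_none h
      simp only [pvBRun, List.foldl_cons]
      rw [pvBWhile_none hn]
      exact ih (i + 1) (by omega)

theorem drop_getElem? {qs : List Int} {i : Nat} {q : Int} {t : List Int}
    (h : qs.drop i = q :: t) : qs[i]? = some q := by
  have h0 : (qs.drop i)[0]? = qs[i + 0]? := List.getElem?_drop
  simp [h] at h0
  exact h0.symm

theorem drop_succ_of_drop {qs : List Int} {i : Nat} {q : Int} {t : List Int}
    (h : qs.drop i = q :: t) : qs.drop (i + 1) = t := by
  have hd : qs.drop (i + 1) = (qs.drop i).drop 1 := by rw [List.drop_drop]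
  simp [hd, h]

-- Core correspondence: A's loop on the suffix qs.drop i equals B's run from state (out, i).
theorem pvALoop_eq_pvBRun (qs : List Int) :
    ∀ qtl es out i, qtl = qs.drop i → pvALoop out qtl es = pvBRun qs es out i := by
  intro qtl
  induction qtl with
  | nil =>
      intro es out i hdrop
      have hlen : qs.length ≤ i := by
        have := List.drop_eq_nil_iff.mp hdrop.symm
        omega
      cases es with
      | nil => simp [pvALoop, pvBRun, List.drop_eq_nil_of_le hlen]
      | cons e es => rw [pvALoop, pvBRun_past qs (e :: es) out i hlen]
  | cons q qtl ih =>
      intro es out i hdrop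
      have hq : qs[i]? = some q := drop_getElem? hdrop.symm
      have ht : qs.drop (i + 1) = qtl := drop_succ_of_drop hdrop.symm
      cases es with
      | nil => simp [pvALoop, pvBRun, ← hdrop]
      | cons e es =>
          by_cases hlt : q < e
          · rw [pvALoop, if_pos hlt]
            have hstep : pvBRun qs (e :: es) out i = pvBRun qs (e :: es) (out ++ [q]) (i + 1) := by
              simp only [pvBRun, List.foldl_cons]
              rw [pvBWhile_lt hq hlt]
            rw [hstep]
            exact ih (e :: es) (out ++ [q]) (i + 1) ht.symm
          · rw [pvALoop, if_neg hlt]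
            have hstep : pvBRun qs (e :: es) out i = pvBRun qs es out (i + 1) := by
              simp only [pvBRun, List.foldl_cons]
              rw [pvBWhile_ge hq hlt]
            rw [hstep]
            exact ih es out (i + 1) ht.symm

-- ===== VERDICT (by name: the statement is the Claim_ definition above) =====
theorem getListComplement_spec : Claim_equal_getListComplement := by
  intro q e _ _
  show getListComplement q e = getListComplement_alt q e
  have := pvALoop_eq_pvBRun (PySem.List.sorted q (fun x => x))
      (PySem.List.sorted q (fun x => x)) (PySem.List.sorted e (fun x => x)) [] 0 (by simp)
  simpa [getListComplement, getListComplement_alt, pvBRun] using this
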